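-- pv_equiv track=rewrite | github.com/Raychani1/Advent_of_Code_Collection | advent_of_code/advent_of_code_2024/day_09/aoc_2024_09.py | __find_value_blocks
-- ===== SOURCE A (Python) =====
-- from typing import Any, List, Tuple
--
-- def __find_value_blocks(
--     elements: List[Any], value: Any
-- ) -> List[Tuple[int, int]]:
--     """Find starting index and length of each consecutive `value` block in
--     the `elements` list.
--
--     Args:
--         elements (List[Any]): The input list of elements.
--         value (Any): Value to
--
--     Returns:
--         List[Tuple[int, int]]: Each tuple contains (start_index, length) of
--             `value` blocks.
--     """
--     dot_blocks = []
--     n = len(elements)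
--     i = 0
--
--     while i < n:
--         if elements[i] == value:
--             start = i
--             length = 0
--             while i < n and elements[i] == value:
--                 length += 1
--                 i += 1
--             dot_blocks.append((start, length))
--         else:
--             i += 1
--
--     return dot_blocks
-- ===== SOURCE B (Python) =====
-- from typing import Any, List, Tuple
--
-- def __find_value_blocks(
--     elements: List[Any], value: Any
-- ) -> List[Tuple[int, int]]:
--     """Single pass: detect run boundaries by comparing adjacent elements."""
--     blocks = []
--     n = len(elements)
--     run_start = 0
--     for j in range(1, n + 1):
--         if j == n or elements[j] != elements[j - 1]:
--             if elements[run_start] == value: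
--                 blocks.append((run_start, j - run_start))
--             run_start = j
--     return blocks
-- ===== Notes on version B (the rewrite author's own statement) =====
-- stated objective: alternative
-- what changed: A scans with nested while-loops (an inner loop consuming each run of `value`); B makes a single flat pass over positions 1..n that detects maximal-run boundaries by comparing adjacent elements, closing a (start, length) block whenever a boundary ends a run whose first element equals `value`.
import Mathlib
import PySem

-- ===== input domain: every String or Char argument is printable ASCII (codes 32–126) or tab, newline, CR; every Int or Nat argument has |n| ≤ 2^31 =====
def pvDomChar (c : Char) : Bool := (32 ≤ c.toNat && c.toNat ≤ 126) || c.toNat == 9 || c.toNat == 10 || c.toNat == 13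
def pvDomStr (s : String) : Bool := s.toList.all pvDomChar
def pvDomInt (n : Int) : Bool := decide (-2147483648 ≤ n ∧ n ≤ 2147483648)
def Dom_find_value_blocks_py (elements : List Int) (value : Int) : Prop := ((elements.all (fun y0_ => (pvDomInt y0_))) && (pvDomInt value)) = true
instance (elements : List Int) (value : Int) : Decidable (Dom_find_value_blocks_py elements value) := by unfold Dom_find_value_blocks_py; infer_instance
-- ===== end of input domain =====

-- B replaces A's nested while-loops (inner scan per run of `value`) by a single pass that
-- detects run boundaries by comparing adjacent elements; same O(n) cost, different decomposition.

-- ===== PORT A =====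
-- fuel = remaining indices; called with fuel ≥ n - i, so the 0 case is never hit
def pvAInner (e : List Int) (v : Int) (n : Nat) : Nat → Nat → Nat → Nat × Nat
  | 0, i, l => (i, l)
  | fuel + 1, i, l =>
    if i < n ∧ (e.getD i 0 == v) = true then pvAInner e v n fuel (i + 1) (l + 1)
    else (i, l)

def pvAOuter (e : List Int) (v : Int) (n : Nat) : Nat → Nat → List (Int × Int)
  | 0, _ => []
  | fuel + 1, i =>
    if i < n then
      if (e.getD i 0 == v) = true then
        ((i : Int), ((pvAInner e v n n i 0).2 : Int)) ::
          pvAOuter e v n fuel (pvAInner e v n n i 0).1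
      else
        pvAOuter e v n fuel (i + 1)
    else []

def find_value_blocks_py (elements : List Int) (value : Int) : List (Int × Int) :=
  pvAOuter elements value elements.length elements.length 0

-- ===== PORT B =====
-- body of B's `for j in range(1, n+1)` loop; state = (run_start, blocks)
def pvBStep (e : List Int) (v : Int) (n : Nat) (st : Nat × List (Int × Int)) (j : Nat) :
    Nat × List (Int × Int) :=
  if (j == n) || !(e.getD j 0 == e.getD (j - 1) 0) then
    (j, if (e.getD st.1 0 == v) = true then
          st.2 ++ [((st.1 : Int), (j : Int) - (st.1 : Int))]
        else st.2)
  else st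

def find_value_blocks_py_alt (elements : List Int) (value : Int) : List (Int × Int) :=
  ((List.range' 1 elements.length).foldl
      (pvBStep elements value elements.length) (0, [])).2

-- ===== PRECONDITION & SPEC =====
def Spec_find_value_blocks_py (elements : List Int) (value : Int) (out : List (Int × Int)) : Prop := out = find_value_blocks_py_alt elements value
instance (elements : List Int) (value : Int) (out : List (Int × Int)) : Decidable (Spec_find_value_blocks_py elements value out) := by unfold Spec_find_value_blocks_py; infer_instance

-- ===== CLAIM (what is proved, stated in full; the proofs are below) =====
def Claim_equal_find_value_blocks_py : Prop := ∀ (elements : List Int) (value : Int), Dom_find_value_blocks_py elements value → Spec_find_value_blocks_py elements value (find_value_blocks_py elements value)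

-- ===== LEMMAS AND PROOFS =====

-- reference function both ports are reduced to: emits (start, length) of each maximal
-- run of `v`, recursing structurally with absolute index i
def pvS (v : Int) (i : Int) : List Int → List (Int × Int)
  | [] => []
  | x :: rest =>
    if (x == v) = true then
      (i, 1 + ((rest.takeWhile (· == v)).length : Int)) ::
        pvS v (i + 1 + ((rest.takeWhile (· == v)).length : Int)) (rest.dropWhile (· == v))
    else pvS v (i + 1) rest
termination_by xs => xs.length
decreasing_by
  · have := List.length_dropWhile_le (· == v) rest
    simp; omega
  · simp


theorem pvAInner_eq (e : List Int) (v : Int) (fuel : Nat) :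
    ∀ i l, i ≤ e.length → e.length - i ≤ fuel →
    pvAInner e v e.length fuel i l =
      (i + ((e.drop i).takeWhile (· == v)).length,
       l + ((e.drop i).takeWhile (· == v)).length) := by
  induction fuel with
  | zero =>
    intro i l hi hf
    have hieq : i = e.length := by omega
    have hnil : e.drop i = [] := List.drop_eq_nil_of_le (by omega)
    simp [pvAInner, hnil]
  | succ fuel ih =>
    intro i l hi hf
    rcases Nat.lt_or_ge i e.length with h1 | h1
    · have hd : e.drop i = e[i] :: e.drop (i+1) := List.drop_eq_getElem_cons h1
      have hg : e.getD i 0 = e[i] := List.getD_eq_getElem e 0 h1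
      by_cases hv : (e.getD i 0 == v) = true
      · rw [show pvAInner e v e.length (fuel+1) i l = pvAInner e v e.length fuel (i+1) (l+1) from by
            simp only [pvAInner]
            rw [if_pos ⟨h1, hv⟩]]
        rw [ih (i+1) (l+1) (by omega) (by omega)]
        rw [hd, List.takeWhile_cons_of_pos (p := (· == v)) (by rw [← hg]; exact hv)]
        simp
        omega
      · rw [show pvAInner e v e.length (fuel+1) i l = (i, l) from by
            simp only [pvAInner]
            rw [if_neg (by intro hc; exact hv hc.2)]]
        rw [hd, List.takeWhile_cons_of_neg (p := (· == v)) (by rw [← hg]; exact hv)]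
        simp
    · have hnil : e.drop i = [] := List.drop_eq_nil_of_le (by omega)
      have hieq : i = e.length := by omega
      subst hieq
      rw [show pvAInner e v e.length (fuel+1) e.length l = (e.length, l) from by
          simp only [pvAInner]
          rw [if_neg (by intro hc; omega)]]
      simp [hnil]

theorem pvDropWhile_eq_drop (p : Int → Bool) (xs : List Int) :
    xs.dropWhile p = xs.drop (xs.takeWhile p).length := by
  induction xs with
  | nil => rfl
  | cons x t ih =>
    by_cases hp : p x = true
    · rw [List.dropWhile_cons_of_pos hp, List.takeWhile_cons_of_pos hp, ih]
      simp
    · rw [List.dropWhile_cons_of_neg (by simp [hp]), List.takeWhile_cons_of_neg (by simp [hp])]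
      simp

theorem pvAOuter_eq_S (e : List Int) (v : Int) (fuel : Nat) :
    ∀ i, i ≤ e.length → e.length - i ≤ fuel →
    pvAOuter e v e.length fuel i = pvS v (i : Int) (e.drop i) := by
  induction fuel with
  | zero =>
    intro i hi hf
    have hnil : e.drop i = [] := List.drop_eq_nil_of_le (by omega)
    simp [pvAOuter, hnil, pvS]
  | succ fuel ih =>
    intro i hi hf
    rcases Nat.lt_or_ge i e.length with h1 | h1
    · have hd : e.drop i = e[i] :: e.drop (i+1) := List.drop_eq_getElem_cons h1
      have hg : e.getD i 0 = e[i] := List.getD_eq_getElem e 0 h1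
      have hk'le : ((e.drop (i+1)).takeWhile (· == v)).length ≤ (e.drop (i+1)).length :=
        (List.takeWhile_prefix _).length_le
      have hlen : (e.drop (i+1)).length = e.length - (i+1) := by simp
      by_cases hv : (e.getD i 0 == v) = true
      · have hin := pvAInner_eq e v e.length i 0 (by omega) (by omega)
        have hkk : ((e.drop i).takeWhile (· == v)).length
            = 1 + ((e.drop (i+1)).takeWhile (· == v)).length := by
          rw [hd, List.takeWhile_cons_of_pos (p := (· == v)) (by rw [← hg]; exact hv)]
          simp [Nat.add_comm]
        rw [show pvAOuter e v e.length (fuel+1) i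
              = ((i : Int), ((pvAInner e v e.length e.length i 0).2 : Int)) ::
                  pvAOuter e v e.length fuel (pvAInner e v e.length e.length i 0).1 from by
            simp only [pvAOuter]
            rw [if_pos h1, if_pos hv]]
        rw [hin, hkk]
        rw [hd, pvS, if_pos (by rw [← hg]; exact hv)]
        rw [ih _ (by omega) (by omega)]
        have hdw : (e.drop (i+1)).dropWhile (· == v)
            = e.drop (i + (1 + ((e.drop (i+1)).takeWhile (· == v)).length)) := by
          rw [pvDropWhile_eq_drop, List.drop_drop]
          congr 1
          omega
        rw [hdw]
        push_cast
        ring_nf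
      · rw [show pvAOuter e v e.length (fuel+1) i = pvAOuter e v e.length fuel (i+1) from by
            simp only [pvAOuter]
            rw [if_pos h1, if_neg hv]]
        rw [hd, pvS, if_neg (by rw [← hg]; exact hv)]
        rw [ih _ (by omega) (by omega)]
        push_cast
        ring_nf
    · have hnil : e.drop i = [] := List.drop_eq_nil_of_le (by omega)
      rw [show pvAOuter e v e.length (fuel+1) i = [] from by
          simp only [pvAOuter]
          rw [if_neg (by omega)]]
      rw [hnil, pvS]


theorem pvS_skip (v : Int) (t r : List Int) (j : Int)
    (ht : ∀ y ∈ t, (y == v) = false) :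
    pvS v j (t ++ r) = pvS v (j + t.length) r := by
  induction t generalizing j with
  | nil => simp
  | cons y t' ih =>
    have hy : (y == v) = false := ht y (by simp)
    rw [List.cons_append, pvS, if_neg (by simp [hy])]
    rw [ih (j + 1) (fun z hz => ht z (by simp [hz]))]
    congr 1
    simp only [List.length_cons]
    push_cast
    ring

theorem pvTakeDropAllEq (e : List Int) (c : Int) (a b : Nat)
    (h : ∀ m, a ≤ m → m < b → e.getD m 0 = c) (_hble : b ≤ e.length) :
    ∀ y ∈ (e.drop a).take (b - a), y = c := by
  intro y hy
  obtain ⟨u, hu, rfl⟩ := List.mem_iff_getElem.mp hy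
  have hu' : u < b - a := by
    have := List.length_take (i := b - a) (l := e.drop a)
    omega
  rw [List.getElem_take, List.getElem_drop]
  have hlt : a + u < e.length := by
    have := List.length_take (i := b - a) (l := e.drop a)
    have := List.length_drop (l := e) (i := a)
    omega
  rw [← List.getD_eq_getElem e 0 hlt]
  exact h (a + u) (by omega) (by omega)

theorem pvFoldB_inv (e : List Int) (v : Int) :
    ∀ (k j s : Nat) (acc : List (Int × Int)),
      j + k = e.length + 1 → 1 ≤ j → j ≤ e.length → s < j →
      (∀ m, s ≤ m → m < j → e.getD m 0 = e.getD s 0) →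
      ((List.range' j k).foldl (pvBStep e v e.length) (s, acc)).2 =
        acc ++ pvS v (s : Int) (e.drop s) := by
  intro k
  induction k with
  | zero => intro j s acc h1 h2 h3 h4 hinv; omega
  | succ k ih =>
    intro j s acc h1 h2 h3 h4 hinv
    have hs : s < e.length := by omega
    have hds : e.drop s = e[s] :: e.drop (s+1) := List.drop_eq_getElem_cons hs
    have hgs : e.getD s 0 = e[s] := List.getD_eq_getElem e 0 hs
    have hjm : e.getD (j-1) 0 = e.getD s 0 := hinv (j-1) (by omega) (by omega)
    rw [List.range'_succ, List.foldl_cons]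
    by_cases hjn : j = e.length
    · -- last step: j = n, forced boundary, k = 0
      have hk0 : k = 0 := by omega
      subst hk0
      simp only [List.range'_zero, List.foldl_nil]
      have hall : ∀ y ∈ e.drop (s+1), y = e[s] := by
        intro y hy
        obtain ⟨u, hu, rfl⟩ := List.mem_iff_getElem.mp hy
        rw [List.getElem_drop]
        have hlt : s + 1 + u < e.length := by
          have := List.length_drop (l := e) (i := s+1); omega
        rw [← List.getD_eq_getElem e 0 hlt, ← hgs]
        exact hinv (s+1+u) (by omega) (by omega)
      have hlen : (e.drop (s+1)).length = e.length - (s+1) := by simp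
      by_cases hv : (e.getD s 0 == v) = true
      · have hev : e[s] = v := by rw [← hgs]; exact beq_iff_eq.mp hv
        have hstep : (pvBStep e v e.length (s, acc) j).2
            = acc ++ [((s : Int), (j : Int) - (s : Int))] := by
          have hc : ((j == e.length) || !(e.getD j 0 == e.getD (j - 1) 0)) = true := by
            simp [hjn]
          show (if _ = true then _ else _ : Nat × List (Int × Int)).2 = _
          rw [if_pos hc]
          show (if (e.getD s 0 == v) = true then _ else _ : List (Int × Int)) = _
          rw [if_pos hv]
        have htw : (e.drop (s+1)).takeWhile (· == v) = e.drop (s+1) :=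
          List.takeWhile_eq_self_iff.mpr (by
            intro y hy
            show (y == v) = true
            rw [hall y hy, hev]
            exact beq_self_eq_true v)
        have hdw : (e.drop (s+1)).dropWhile (· == v) = [] :=
          List.dropWhile_eq_nil_iff.mpr (by
            intro y hy
            show (y == v) = true
            rw [hall y hy, hev]
            exact beq_self_eq_true v)
        rw [hstep, hds, pvS, if_pos (by rw [hev]; exact beq_self_eq_true v), htw, hdw, pvS]
        have hval : (j : Int) - (s : Int) = 1 + ((e.drop (s+1)).length : Int) := by
          rw [hlen]
          omega
        rw [hval]
      · have hvf : (e.getD s 0 == v) = false := by simpa using hv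
        have hstep : (pvBStep e v e.length (s, acc) j).2 = acc := by
          have hc : ((j == e.length) || !(e.getD j 0 == e.getD (j - 1) 0)) = true := by
            simp [hjn]
          show (if _ = true then _ else _ : Nat × List (Int × Int)).2 = _
          rw [if_pos hc]
          show (if (e.getD s 0 == v) = true then _ else _ : List (Int × Int)) = _
          rw [if_neg (by rw [hvf]; decide)]
        rw [hstep, hds, pvS, if_neg (by rw [← hgs, hvf]; decide)]
        have hsp : e.drop (s+1) = e.drop (s+1) ++ ([] : List Int) := by simp
        rw [hsp, pvS_skip v _ [] _ (by
          intro y hy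
          rw [hall y (by simpa using hy), ← hgs]
          exact hvf), pvS]
        simp
    · -- j < n
      have hjlt : j < e.length := by omega
      by_cases hb : (e.getD j 0 == e.getD (j-1) 0) = true
      · -- no boundary: state unchanged
        rw [show pvBStep e v e.length (s, acc) j = (s, acc) from by
              have hc : ((j == e.length) || !(e.getD j 0 == e.getD (j - 1) 0)) = false := by
                rw [hb]
                simp [hjn]
              show (if _ = true then _ else _) = _
              rw [if_neg (by rw [hc]; decide)]]
        exact ih (j+1) s acc (by omega) (by omega) (by omega) (by omega) (by
          intro m hm1 hm2
          rcases Nat.lt_or_ge m j with hmj | hmj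
          · exact hinv m hm1 hmj
          · have hmeq : m = j := by omega
            subst hmeq
            rw [beq_iff_eq.mp hb, hjm])
      · -- boundary: run [s, j) closes, new fresh state (j, acc')
        have hbf : (e.getD j 0 == e.getD (j-1) 0) = false := by simpa using hb
        -- decompose drop (s+1) e = t ++ drop j e
        have hlen1 : (e.drop (s+1)).length = e.length - (s+1) := by simp
        set t := (e.drop (s+1)).take (j - (s+1)) with htdef
        have htlen : t.length = j - s - 1 := by
          rw [htdef, List.length_take]
          omega
        have hsplit : e.drop (s+1) = t ++ e.drop j := by
          rw [htdef]
          conv_lhs => rw [← List.take_append_drop (j - (s+1)) (e.drop (s+1))]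
          congr 1
          rw [List.drop_drop]
          congr 1
          omega
        have htall : ∀ y ∈ t, y = e.getD s 0 := by
          rw [htdef, show j - (s+1) = j - (s+1) from rfl]
          exact pvTakeDropAllEq e (e.getD s 0) (s+1) j
            (fun m hm1 hm2 => hinv m (by omega) hm2) (by omega)
        have hdj : e.drop j = e[j] :: e.drop (j+1) := List.drop_eq_getElem_cons hjlt
        have hgj : e.getD j 0 = e[j] := List.getD_eq_getElem e 0 hjlt
        have hne : (e[j] == e.getD s 0) = false := by
          rw [hjm, hgj] at hbf
          exact hbf
        have harg : (s : Int) + 1 + (t.length : Int) = (j : Int) := by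
          rw [htlen]
          omega
        by_cases hv : (e.getD s 0 == v) = true
        · have hev : e.getD s 0 = v := beq_iff_eq.mp hv
          have hstep : pvBStep e v e.length (s, acc) j
              = (j, acc ++ [((s : Int), (j : Int) - (s : Int))]) := by
            have hc : ((j == e.length) || !(e.getD j 0 == e.getD (j - 1) 0)) = true := by
              rw [hbf]; simp
            show (if _ = true then _ else _) = _
            rw [if_pos hc]
            show (j, if (e.getD s 0 == v) = true then _ else _) = _
            rw [if_pos hv]
          rw [hstep,
            ih (j+1) j (acc ++ [((s : Int), (j : Int) - (s : Int))])
              (by omega) (by omega) (by omega) (by omega)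
              (by intro m hm1 hm2; exact congrArg (fun x => e.getD x 0) (by omega : m = j))]
          have htw : ((t ++ e.drop j).takeWhile (· == v)) = t := by
            rw [List.takeWhile_append_of_pos (by
              intro y hy
              show (y == v) = true
              rw [htall y hy, hev]
              exact beq_self_eq_true v)]
            rw [hdj, List.takeWhile_cons_of_neg (by
              show ¬ ((e[j] == v) = true)
              rw [← hev, hne]
              decide)]
            simp
          have hdw : ((t ++ e.drop j).dropWhile (· == v)) = e.drop j := by
            rw [List.dropWhile_append_of_pos (by
              intro y hy
              show (y == v) = true
              rw [htall y hy, hev]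
              exact beq_self_eq_true v)]
            rw [hdj, List.dropWhile_cons_of_neg (by
              show ¬ ((e[j] == v) = true)
              rw [← hev, hne]
              decide)]
          rw [hds, hsplit, pvS, if_pos (by rw [← hgs, hev]; exact beq_self_eq_true v), htw, hdw, harg]
          have hval : (1 : Int) + (t.length : Int) = (j : Int) - (s : Int) := by
            rw [htlen]
            omega
          rw [hval]
          simp
        · have hvf : (e.getD s 0 == v) = false := by simpa using hv
          have hstep : pvBStep e v e.length (s, acc) j = (j, acc) := by
            have hc : ((j == e.length) || !(e.getD j 0 == e.getD (j - 1) 0)) = true := by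
              rw [hbf]; simp
            show (if _ = true then _ else _) = _
            rw [if_pos hc]
            show (j, if (e.getD s 0 == v) = true then _ else _) = _
            rw [if_neg (by rw [hvf]; decide)]
          rw [hstep,
            ih (j+1) j acc (by omega) (by omega) (by omega) (by omega)
              (by intro m hm1 hm2; exact congrArg (fun x => e.getD x 0) (by omega : m = j))]
          rw [hds, hsplit, pvS, if_neg (by rw [← hgs, hvf]; decide)]
          rw [pvS_skip v t (e.drop j) _ (by
            intro y hy
            rw [htall y hy]
            exact hvf), harg]

-- ===== VERDICT (by name: the statement is the Claim_ definition above) =====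
theorem find_value_blocks_py_spec : Claim_equal_find_value_blocks_py := by
  intro e v _
  unfold Spec_find_value_blocks_py find_value_blocks_py find_value_blocks_py_alt
  cases e with
  | nil => simp [pvAOuter]
  | cons x xs =>
    rw [pvAOuter_eq_S _ _ _ 0 (by simp) (by omega)]
    rw [pvFoldB_inv (x :: xs) v (x :: xs).length 1 0 [] (by omega) (by omega)
        (by simp) (by omega) ?_]
    · simp
    · intro m h1 h2
      have hm : m = 0 := by omega
      subst hm
      rfl
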